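-- pv_equiv track=rewrite | github.com/dhumindesai/Problem-Solving | misc/min_steps_to_make_piles_equal_height.py | min_steps_balance
-- ===== SOURCE A (Python) =====
-- def min_steps_balance(piles):
--     piles.sort(reverse=True)
--     result = 0
--     min_height = float("inf")
--     max_height = float("-inf")
--     sum = 0
--
--     for p in piles:
--         min_height = min(min_height, p)
--         max_height = max(max_height, p)
--         sum += p
--
--     while sum != (min_height * len(piles)):
--         for i in range(len(piles)):
--             if piles[i] == max_height and i < len(piles) - 1 and piles[i] > piles[i+1]:
--                 sum = sum - (piles[i] - piles[i+1])
--                 piles[i] = piles[i+1]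
--                 result += 1
--                 max_height = max(piles)
--                 break
--
--     return result
-- ===== SOURCE B (Python) =====
-- def min_steps_balance(piles):
--     # One pass over the ascending sort: each element costs the number of
--     # distinct values strictly below it (the running distinct counter).
--     s = sorted(piles)
--     result = 0
--     distinct = 0
--     for prev, cur in zip(s, s[1:]):
--         if cur != prev:
--             distinct += 1
--         result += distinct
--     return result
-- ===== Notes on version B (the rewrite author's own statement) =====
-- stated objective: faster
-- what changed: A repeatedly rescans the list to lower one max pile per step until all piles equal the min; B sorts once ascending and sums a running distinct-value counter over adjacent pairs, computing the step count in a single pass with no simulation.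
-- outside the precondition, e.g. on min_steps_balance([]): A does not finish within the time limit, B returns 0
import Mathlib
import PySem

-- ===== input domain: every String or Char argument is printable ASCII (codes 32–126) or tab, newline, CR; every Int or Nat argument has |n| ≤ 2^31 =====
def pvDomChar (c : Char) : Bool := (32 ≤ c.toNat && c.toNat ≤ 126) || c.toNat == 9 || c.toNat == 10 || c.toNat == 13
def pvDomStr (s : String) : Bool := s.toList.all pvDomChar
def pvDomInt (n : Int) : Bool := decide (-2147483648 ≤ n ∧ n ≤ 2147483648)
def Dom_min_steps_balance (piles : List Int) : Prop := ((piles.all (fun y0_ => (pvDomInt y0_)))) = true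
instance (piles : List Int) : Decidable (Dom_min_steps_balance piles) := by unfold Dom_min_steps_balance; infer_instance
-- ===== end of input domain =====

-- B replaces A's step-by-step simulation (repeatedly lowering one max pile until all equal the
-- min) by a single pass over the ascending sort summing a running distinct-value counter: an
-- asymptotically faster computation of the same count. Python A mutates its argument in place
-- (sorts it and levels every pile to the min); B does not — the equivalence proved here is about
-- the RETURN value only.

-- ===== PORT A =====
-- inner 'for i in range(len(piles)) … break' scan: first i with piles[i]=maxh, i<n-1, piles[i]>piles[i+1];
-- performs the mutation piles[i] := piles[i+1] and returns (new list, piles[i]-piles[i+1]); none = no such i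
def pvStepA : List Int → Int → Option (List Int × Int)
  | a :: b :: rest, maxh =>
      if a = maxh ∧ a > b then some (b :: b :: rest, a - b)
      else (pvStepA (b :: rest) maxh).map (fun p => (a :: p.1, p.2))
  | _, _ => none

-- the 'while sum != min_height*len(piles)' loop; the fuel only makes the recursion total (Python's
-- loop would spin forever exactly when the fuel is exhausted or pvStepA finds nothing, which the
-- proof shows is unreachable under Pre_); maxh is recomputed as max(piles) after each mutation
def pvLoopA : Nat → List Int → Int → Int → Int → Int → Int
  | 0, _, _, _, _, result => result
  | fuel + 1, l, minh, maxh, sum, result =>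
      if sum = minh * (l.length : Int) then result
      else
        match pvStepA l maxh with
        | none => result
        | some (l', d) =>
            pvLoopA fuel l' minh ((PySem.List.max? l' (fun x => x)).getD maxh) (sum - d)
              (result + 1)

-- the single 'for p in piles' pass accumulating (min_height, max_height, sum); the float ±inf
-- starting sentinels are ported as none (min(inf,p)=p, max(-inf,p)=p)
def pvAggA (st : Option Int × Option Int × Int) (p : Int) : Option Int × Option Int × Int :=
  (some (match st.1 with | none => p | some m => min m p),
   some (match st.2.1 with | none => p | some m => max m p),
   st.2.2 + p)

def min_steps_balance (piles : List Int) : Int :=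
  match (PySem.List.sorted piles (fun x => x) true).foldl pvAggA (none, none, 0) with
  | (some minh, some maxh, s) =>
      pvLoopA ((s - minh * ((PySem.List.sorted piles (fun x => x) true).length : Int)).toNat + 1)
        (PySem.List.sorted piles (fun x => x) true) minh maxh s 0
  | _ => 0   -- empty list: Python diverges here (excluded by Pre_)

-- ===== PORT B =====
-- the 'for prev, cur in zip(s, s[1:])' loop of Source B, carrying prev, distinct, result
def pvLoopB : List Int → Int → Int → Int → Int
  | [], _, _, result => result
  | cur :: rest, prev, distinct, result =>
      let d := if cur ≠ prev then distinct + 1 else distinct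
      pvLoopB rest cur d (result + d)

def min_steps_balance_alt (piles : List Int) : Int :=
  match PySem.List.sorted piles (fun x => x) false with
  | [] => 0
  | h :: t => pvLoopB t h 0 0

-- ===== PRECONDITION & SPEC =====
-- Pre_ excludes only the empty list, on which A never returns (the while-condition 0 != inf*0 is
-- True forever); B returns 0 there.
def Pre_min_steps_balance (piles : List Int) : Prop := piles ≠ []
instance (piles : List Int) : Decidable (Pre_min_steps_balance piles) := by
  unfold Pre_min_steps_balance; infer_instance

def pvWitness_min_steps_balance : List Int := [2, 1, 2]

def Spec_min_steps_balance (piles : List Int) (out : Int) : Prop := out = min_steps_balance_alt piles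
instance (piles : List Int) (out : Int) : Decidable (Spec_min_steps_balance piles out) := by
  unfold Spec_min_steps_balance; infer_instance

-- ===== CLAIM (what is proved, stated in full; the proofs are below) =====
def Claim_equal_min_steps_balance : Prop := ∀ (piles : List Int), Dom_min_steps_balance piles → Pre_min_steps_balance piles → Spec_min_steps_balance piles (min_steps_balance piles)

-- ===== LEMMAS AND PROOFS =====

-- W prev xs: total contribution of the suffix xs of the ascending pass to B's result when the
-- previous element is prev and the distinct counter is 0: each element that differs from its
-- predecessor adds (remaining length) to the total.
def pvW : Int → List Int → Int
  | _, [] => 0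
  | p, x :: t => (if x = p then 0 else (t.length : Int) + 1) + pvW x t

-- number of distinct-counter increments along xs after prev
def pvC : Int → List Int → Int
  | _, [] => 0
  | p, x :: t => (if x = p then 0 else 1) + pvC x t

-- last element of p :: xs
def pvLastD : Int → List Int → Int
  | p, [] => p
  | _, x :: t => pvLastD x t

-- B's value on an ascending list
def pvBV : List Int → Int
  | [] => 0
  | h :: t => pvW h t

lemma pvLoopB_eq (xs : List Int) : ∀ (p d r : Int),
    pvLoopB xs p d r = r + d * (xs.length : Int) + pvW p xs := by
  induction xs with
  | nil => intro p d r; simp [pvLoopB, pvW]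
  | cons x t ih =>
      intro p d r
      by_cases hx : x = p
      · simp [pvLoopB, pvW, hx, ih]; ring
      · simp [pvLoopB, pvW, hx, ih]; ring

lemma pvW_append (xs : List Int) : ∀ (p : Int) (ys : List Int),
    pvW p (xs ++ ys) =
      pvW p xs + pvC p xs * (ys.length : Int) + pvW (pvLastD p xs) ys := by
  induction xs with
  | nil => intro p ys; simp [pvW, pvC, pvLastD]
  | cons x t ih =>
      intro p ys
      by_cases hx : x = p
      · simp [pvW, pvC, pvLastD, hx, ih]
      · simp [pvW, pvC, pvLastD, hx, ih]; ring

lemma pvLastD_append_singleton (xs : List Int) : ∀ (p y : Int), pvLastD p (xs ++ [y]) = y := by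
  induction xs with
  | nil => intro p y; simp [pvLastD]
  | cons x t ih => intro p y; simp [pvLastD, ih]

lemma pvW_replicate (k : Nat) (p v : Int) (h : v ≠ p) :
    pvW p (List.replicate k v) = (k : Int) := by
  cases k with
  | zero => simp [pvW]
  | succ m =>
      rw [List.replicate_succ]
      have hrep : ∀ n : Nat, pvW v (List.replicate n v) = 0 := by
        intro n; induction n with
        | zero => simp [pvW]
        | succ j ihj => rw [List.replicate_succ]; simp [pvW, ihj]
      simp [pvW, h, hrep m]

lemma pvBV_append_last (xs : List Int) (y : Int) (ys : List Int) :
    pvBV ((xs ++ [y]) ++ ys) =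
      pvBV (xs ++ [y]) + (match xs ++ [y] with | [] => 0 | h :: t => pvC h t) * (ys.length : Int)
        + pvW y ys := by
  cases xs with
  | nil => simp [pvBV, pvW, pvC]
  | cons x t =>
      show pvW x ((t ++ [y]) ++ ys) =
        pvW x (t ++ [y]) + pvC x (t ++ [y]) * (ys.length : Int) + pvW y ys
      rw [pvW_append (t ++ [y]) x ys, pvLastD_append_singleton]

lemma pvW_all_eq (xs : List Int) : ∀ (c p : Int), (∀ x ∈ xs, x = c) → p = c → pvW p xs = 0 := by
  induction xs with
  | nil => intro c p _ _; simp [pvW]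
  | cons x t ih =>
      intro c p hall hp
      have hx : x = c := hall x (by simp)
      subst hx; subst hp
      simp [pvW, ih p p (fun z hz => hall z (by simp [hz])) rfl]

lemma pvBV_all_eq (xs : List Int) (c : Int) (h : ∀ x ∈ xs, x = c) : pvBV xs = 0 := by
  cases xs with
  | nil => simp [pvBV]
  | cons x t =>
      simp only [pvBV]
      exact pvW_all_eq t c x (fun z hz => h z (by simp [hz])) (h x (by simp))

lemma pv_min_mul_le_sum (t : List Int) : ∀ m : Int, (∀ x ∈ t, m ≤ x) →
    m * (t.length : Int) ≤ t.sum := by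
  induction t with
  | nil => intro m _; simp
  | cons x q ih =>
      intro m h
      have h1 : m ≤ x := h x (by simp)
      have h2 := ih m (fun z hz => h z (by simp [hz]))
      simp only [List.length_cons, List.sum_cons]
      push_cast
      nlinarith
      
lemma pv_sum_eq_min_all_eq (l : List Int) : ∀ m : Int, (∀ x ∈ l, m ≤ x) →
    l.sum = m * (l.length : Int) → ∀ x ∈ l, x = m := by
  induction l with
  | nil => intro m _ _ x hx; simp at hx
  | cons a t ih =>
      intro m hge hsum x hx
      have h1 : m ≤ a := hge a (by simp)
      have h2 := pv_min_mul_le_sum t m (fun z hz => hge z (by simp [hz]))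
      have hlen : ((a :: t).length : Int) = (t.length : Int) + 1 := by
        simp [List.length_cons]
      rw [List.sum_cons, hlen] at hsum
      have ha : a = m := by nlinarith
      have hts : t.sum = m * (t.length : Int) := by nlinarith
      rcases List.mem_cons.mp hx with h | h
      · omega
      · exact ih m (fun z hz => hge z (by simp [hz])) hts x h

-- decomposition of a sorted-descending list with an element below its head
lemma pv_split_desc (t : List Int) : ∀ v : Int, (v :: t).Pairwise (· ≥ ·) →
    (∃ x ∈ t, x < v) →
    ∃ (k : Nat) (b : Int) (rest : List Int),
      v :: t = List.replicate (k + 1) v ++ b :: rest ∧ b < v := by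
  induction t with
  | nil => intro v _ hx; simp at hx
  | cons x t' ih =>
      intro v hp hx
      by_cases hxv : x < v
      · exact ⟨0, x, t', by simp, hxv⟩
      · have hvx : v ≥ x := (List.pairwise_cons.mp hp).1 x (by simp)
        have hx_eq : x = v := le_antisymm hvx (not_lt.mp hxv)
        obtain ⟨w, hw, hwlt⟩ := hx
        have hw' : w ∈ t' := by
          rcases List.mem_cons.mp hw with h | h
          · omega
          · exact h
        have hp' : (v :: t').Pairwise (· ≥ ·) := by
          subst hx_eq
          exact (List.pairwise_cons.mp ((List.pairwise_cons.mp hp).2)).2.cons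
            (fun z hz => (List.pairwise_cons.mp hp).1 z (by simp [hz]))
        obtain ⟨k, b, rest, heq, hb⟩ := ih v hp' ⟨w, hw', hwlt⟩
        refine ⟨k + 1, b, rest, ?_, hb⟩
        rw [List.replicate_succ, List.cons_append, hx_eq, heq]

lemma pvStepA_replicate (k : Nat) : ∀ (v b : Int) (rest : List Int), b < v →
    pvStepA (List.replicate (k + 1) v ++ b :: rest) v =
      some (List.replicate k v ++ b :: b :: rest, v - b) := by
  induction k with
  | zero => intro v b rest hb; simp [pvStepA, hb]
  | succ m ih =>
      intro v b rest hb
      rw [List.replicate_succ, List.cons_append]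
      have hcons : List.replicate (m + 1) v ++ b :: rest =
          v :: (List.replicate m v ++ b :: rest) := by
        rw [List.replicate_succ, List.cons_append]
      rw [hcons]
      show pvStepA (v :: v :: (List.replicate m v ++ b :: rest)) v = _
      have hno : ¬ (v = v ∧ v > v) := by simp
      rw [pvStepA, if_neg hno]
      rw [← hcons, ih v b rest hb]
      simp [List.replicate_succ]

-- the change of B's value under one A-step
lemma pvBV_step (k : Nat) (v b : Int) (rest : List Int) (hb : b < v) :
    pvBV (List.replicate (k + 1) v ++ b :: rest).reverse =
      pvBV (List.replicate k v ++ b :: b :: rest).reverse + 1 := by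
  have hrev1 : (List.replicate (k + 1) v ++ b :: rest).reverse =
      (rest.reverse ++ [b]) ++ List.replicate (k + 1) v := by
    simp [List.reverse_append]
  have hrev2 : (List.replicate k v ++ b :: b :: rest).reverse =
      (rest.reverse ++ [b]) ++ (b :: List.replicate k v) := by
    simp [List.reverse_append]
  rw [hrev1, hrev2, pvBV_append_last, pvBV_append_last]
  have hW1 : pvW b (List.replicate (k + 1) v) = (k : Int) + 1 := by
    rw [pvW_replicate (k + 1) b v (by omega)]; push_cast; ring
  have hW2 : pvW b (b :: List.replicate k v) = (k : Int) := by
    simp only [pvW]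
    rw [pvW_replicate k b v (by omega)]
    simp
  rw [hW1, hW2]
  simp
  ring

lemma pv_sum_of_all_eq (l : List Int) (c : Int) (h : ∀ x ∈ l, x = c) :
    l.sum = c * (l.length : Int) := by
  induction l with
  | nil => simp
  | cons a t ih =>
      have ha : a = c := h a (by simp)
      have ht := ih (fun z hz => h z (by simp [hz]))
      simp only [List.sum_cons, List.length_cons, ht, ha]
      push_cast; ring

lemma pv_sum_replicate_int (n : Nat) (v : Int) : (List.replicate n v).sum = (n : Int) * v := by
  rw [List.sum_replicate, nsmul_eq_mul]

-- the main loop invariant: with correct min/max/sum state and enough fuel, A's loop adds exactly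
-- B's value of the (reversed = ascending) current list
lemma pvLoopA_eq (fuel : Nat) : ∀ (l : List Int) (minh maxh sum result : Int),
    l ≠ [] →
    l.Pairwise (· ≥ ·) →
    minh ∈ l → (∀ x ∈ l, minh ≤ x) →
    maxh ∈ l → (∀ x ∈ l, x ≤ maxh) →
    sum = l.sum →
    (sum - minh * (l.length : Int)).toNat < fuel →
    pvLoopA fuel l minh maxh sum result = result + pvBV l.reverse := by
  induction fuel with
  | zero => intro l _ _ _ _ _ _ _ _ _ _ _ hf; omega
  | succ f ih =>
      intro l minh maxh sum result hne hp hminmem hmin hmaxmem hmax hsum hf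
      by_cases hdone : sum = minh * (l.length : Int)
      · -- all piles already equal the min: B's value is 0
        have hall : ∀ x ∈ l, x = minh := by
          apply pv_sum_eq_min_all_eq l minh hmin
          rw [← hsum, hdone]
        have h0 : pvBV l.reverse = 0 :=
          pvBV_all_eq l.reverse minh (fun x hx => hall x (List.mem_reverse.mp hx))
        simp [pvLoopA, hdone, h0]
      · -- one step: the head block loses one element to the next value
        obtain ⟨v, t, rfl⟩ := List.exists_cons_of_ne_nil hne
        have hvge : ∀ x ∈ t, v ≥ x := (List.pairwise_cons.mp hp).1
        have hvmax : maxh = v := by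
          have h1 : maxh ≤ v := by
            rcases List.mem_cons.mp hmaxmem with h | h
            · omega
            · exact hvge maxh h
          have h2 : v ≤ maxh := hmax v (by simp)
          omega
        have hlt : ∃ x ∈ t, x < v := by
          by_contra hno
          push_neg at hno
          have hall : ∀ x ∈ v :: t, x = v := by
            intro x hx
            rcases List.mem_cons.mp hx with h | h
            · exact h
            · have := hno x h; have := hvge x h; omega
          have hminv : minh = v := hall minh hminmem
          exact hdone (by rw [hsum, pv_sum_of_all_eq _ v hall, hminv])
        obtain ⟨k, b, rest, heq, hb⟩ := pv_split_desc t v hp hlt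
        -- run the step
        have hstep : pvStepA (v :: t) maxh =
            some (List.replicate k v ++ b :: b :: rest, v - b) := by
          rw [hvmax, heq]; exact pvStepA_replicate k v b rest hb
        set l' : List Int := List.replicate k v ++ b :: b :: rest with hl'
        have hlen : ((v :: t).length : Int) = (l'.length : Int) := by
          rw [heq]; simp [hl']; omega
        -- facts about the old list in decomposed form
        have hpold : (List.replicate (k + 1) v ++ b :: rest).Pairwise (· ≥ ·) := by
          rw [← heq]; exact hp
        obtain ⟨hrep, hbr, hcross⟩ := List.pairwise_append.mp hpold
        -- invariants for the new list
        have hmem_old : ∀ x ∈ l', x ∈ v :: t := by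
          intro x hx
          rw [heq, List.mem_append]
          rcases List.mem_append.mp hx with h | h
          · exact Or.inl (by
              rcases List.eq_of_mem_replicate h with rfl
              exact List.mem_replicate.mpr ⟨by omega, rfl⟩)
          · rcases List.mem_cons.mp h with rfl | h
            · exact Or.inr (by simp)
            · exact Or.inr h
        have hne' : l' ≠ [] := by simp [hl']
        have hp' : l'.Pairwise (· ≥ ·) := by
          rw [hl', List.pairwise_append]
          refine ⟨List.pairwise_replicate.mpr (Or.inr le_rfl), ?_, ?_⟩
          · rw [List.pairwise_cons]
            refine ⟨?_, hbr⟩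
            intro z hz
            rcases List.mem_cons.mp hz with rfl | hz
            · exact le_rfl
            · exact (List.pairwise_cons.mp hbr).1 z hz
          · intro x hx y hy
            rcases List.eq_of_mem_replicate hx with rfl
            rcases List.mem_cons.mp hy with rfl | hy
            · omega
            · exact hcross x (List.mem_replicate.mpr ⟨by omega, rfl⟩) y hy
        have hminb : minh ≤ b := hmin b (by rw [heq]; simp)
        have hminmem' : minh ∈ l' := by
          have : minh ∈ b :: rest := by
            have := hminmem
            rw [heq, List.mem_append] at this
            rcases this with h | h
            · rcases List.eq_of_mem_replicate h with rfl; omega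
            · exact h
          rw [hl', List.mem_append]
          rcases List.mem_cons.mp this with rfl | h
          · exact Or.inr (by simp)
          · exact Or.inr (by simp [h])
        have hmin' : ∀ x ∈ l', minh ≤ x := fun x hx => hmin x (hmem_old x hx)
        -- the recomputed max
        obtain ⟨M, hM⟩ : ∃ M, PySem.List.max? l' (fun x => x) = some M := by
          cases hM : PySem.List.max? l' (fun x => x) with
          | none => exact absurd ((PySem.List.max?_eq_none_iff l' _).mp hM) hne'
          | some M => exact ⟨M, rfl⟩
        have hMmem : M ∈ l' := PySem.List.max?_mem hM
        have hMmax : ∀ x ∈ l', x ≤ M := fun x hx => PySem.List.max?_isMax hM x hx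
        -- the new sum
        have hsum' : sum - (v - b) = l'.sum := by
          rw [hsum, heq, hl']
          simp only [List.sum_append, List.sum_cons, pv_sum_replicate_int]
          push_cast; ring
        -- fuel accounting
        have hsum_ge' : minh * (l'.length : Int) ≤ l'.sum :=
          pv_min_mul_le_sum l' minh hmin'
        have hsum_ge : minh * ((v :: t).length : Int) ≤ sum := by
          rw [hsum]; exact pv_min_mul_le_sum (v :: t) minh hmin
        have hfuel' : ((sum - (v - b)) - minh * (l'.length : Int)).toNat < f := by
          rw [hsum']
          rw [hlen] at hsum_ge hdone hf
          omega
        -- recursive call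
        have hrec := ih l' minh M (sum - (v - b)) (result + 1) hne' hp' hminmem' hmin'
          hMmem hMmax hsum' hfuel'
        have hBV : pvBV (v :: t).reverse = pvBV l'.reverse + 1 := by
          rw [heq, hl']; exact pvBV_step k v b rest hb
        calc pvLoopA (f + 1) (v :: t) minh maxh sum result
            = pvLoopA f l' minh ((PySem.List.max? l' (fun x => x)).getD maxh)
                (sum - (v - b)) (result + 1) := by
              simp only [pvLoopA, if_neg hdone, hstep]
          _ = pvLoopA f l' minh M (sum - (v - b)) (result + 1) := by rw [hM]; rfl
          _ = (result + 1) + pvBV l'.reverse := hrec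
          _ = result + pvBV (v :: t).reverse := by rw [hBV]; ring

-- the initial aggregation pass computes (min, max, sum)
lemma pvAggA_fold (t : List Int) : ∀ (a c s : Int),
    ∃ m M, t.foldl pvAggA (some a, some c, s) = (some m, some M, s + t.sum) ∧
      m ≤ a ∧ (∀ x ∈ t, m ≤ x) ∧ (m = a ∨ m ∈ t) ∧
      c ≤ M ∧ (∀ x ∈ t, x ≤ M) ∧ (M = c ∨ M ∈ t) := by
  induction t with
  | nil => intro a c s; exact ⟨a, c, by simp, le_rfl, by simp, Or.inl rfl,
      le_rfl, by simp, Or.inl rfl⟩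
  | cons x q ih =>
      intro a c s
      obtain ⟨m, M, hfold, hma, hmall, hmmem, hcM, hMall, hMmem⟩ := ih (min a x) (max c x) (s + x)
      refine ⟨m, M, ?_, le_trans hma (min_le_left a x), ?_, ?_,
        le_trans (le_max_left c x) hcM, ?_, ?_⟩
      · simpa [pvAggA, List.foldl_cons, add_assoc] using hfold
      · intro z hz
        rcases List.mem_cons.mp hz with rfl | hz
        · exact le_trans hma (min_le_right a z)
        · exact hmall z hz
      · rcases hmmem with h | h
        · rcases min_choice a x with hc | hc
          · exact Or.inl (by omega)
          · exact Or.inr (by simp [h, hc])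
        · exact Or.inr (by simp [h])
      · intro z hz
        rcases List.mem_cons.mp hz with rfl | hz
        · exact le_trans (le_max_right c z) hcM
        · exact hMall z hz
      · rcases hMmem with h | h
        · rcases max_choice c x with hc | hc
          · exact Or.inl (by omega)
          · exact Or.inr (by simp [h, hc])
        · exact Or.inr (by simp [h])

-- the ascending sort is the reverse of the descending sort (Int values: ties are identical)
lemma pv_sorted_asc_eq_rev_desc (piles : List Int) :
    PySem.List.sorted piles (fun x => x) false =
      (PySem.List.sorted piles (fun x => x) true).reverse := by
  apply List.Perm.eq_of_pairwise (le := (· ≤ ·))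
  · intro a b _ _ h1 h2; omega
  · exact PySem.List.sorted_pairwise piles (fun x => x)
  · rw [List.pairwise_reverse]
    exact PySem.List.sorted_pairwise_rev piles (fun x => x)
  · exact ((PySem.List.sorted_perm piles (fun x => x) false).trans
      (PySem.List.sorted_perm piles (fun x => x) true).symm).trans
      (List.reverse_perm _).symm

lemma pv_alt_eq_BV (piles : List Int) :
    min_steps_balance_alt piles = pvBV (PySem.List.sorted piles (fun x => x) false) := by
  unfold min_steps_balance_alt
  cases h : PySem.List.sorted piles (fun x => x) false with
  | nil => simp [pvBV]
  | cons hd tl => simp [pvBV, pvLoopB_eq]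

-- ===== VERDICT (by name: the statement is the Claim_ definition above) =====
theorem min_steps_balance_spec : Claim_equal_min_steps_balance := by
  intro piles _ hpre
  unfold Spec_min_steps_balance
  unfold min_steps_balance
  set l : List Int := PySem.List.sorted piles (fun x => x) true with hl
  have hne : l ≠ [] := by
    rw [hl, Ne, PySem.List.sorted_eq_nil_iff]
    exact hpre
  obtain ⟨h, t, hht⟩ := List.exists_cons_of_ne_nil hne
  have hfold0 : l.foldl pvAggA (none, none, 0) = t.foldl pvAggA (some h, some h, h) := by
    rw [hht]; simp [pvAggA]
  obtain ⟨m, M, hfold, hma, hmall, hmmem, hcM, hMall, hMmem⟩ := pvAggA_fold t h h h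
  have hsum : h + t.sum = l.sum := by rw [hht]; simp
  have hminmem : m ∈ l := by
    rw [hht]
    rcases hmmem with rfl | hm
    · simp
    · simp [hm]
  have hmin : ∀ x ∈ l, m ≤ x := by
    intro x hx
    rw [hht] at hx
    rcases List.mem_cons.mp hx with rfl | hx
    · exact hma
    · exact hmall x hx
  have hMaxmem : M ∈ l := by
    rw [hht]
    rcases hMmem with rfl | hm
    · simp
    · simp [hm]
  have hMax : ∀ x ∈ l, x ≤ M := by
    intro x hx
    rw [hht] at hx
    rcases List.mem_cons.mp hx with rfl | hx
    · exact hcM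
    · exact hMall x hx
  have hpw : l.Pairwise (· ≥ ·) := by
    have := PySem.List.sorted_pairwise_rev piles (fun x => x)
    rw [← hl] at this
    exact this.imp (fun {a b} hab => hab)
  rw [hfold0, hfold, hsum]
  show pvLoopA ((l.sum - m * (l.length : Int)).toNat + 1) l m M l.sum 0 =
    min_steps_balance_alt piles
  rw [pvLoopA_eq ((l.sum - m * (l.length : Int)).toNat + 1) l m M l.sum 0 hne hpw
    hminmem hmin hMaxmem hMax rfl (by omega)]
  rw [pv_alt_eq_BV, pv_sorted_asc_eq_rev_desc, ← hl]
  ring
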